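-- pv_equiv track=rewrite | github.com/scikit-allel/skallel-tensor | src/skallel_tensor/utils.py | get_variants_array_names
-- ===== SOURCE A (Python) =====
-- VCF_FIXED_FIELDS = ["CHROM", "POS", "ID", "REF", "ALT", "QUAL"]
--
-- def get_variants_array_names(variants, names=None):
--
--     # Discover array keys.
--     all_names = sorted(variants)
--
--     if names is None:
--         # Return all names, reordering so VCF fixed fields are first.
--         names = [k for k in VCF_FIXED_FIELDS if k in all_names]
--         names += [k for k in all_names if k.startswith("FILTER")]
--         names += [k for k in all_names if k not in names]
--
--     else:
--         # Check requested keys are present in data.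
--         names = list(names)
--         for n in names:
--             if n not in all_names:
--                 raise ValueError
--
--     return names
-- ===== SOURCE B (Python) =====
-- VCF_FIXED_FIELDS = ["CHROM", "POS", "ID", "REF", "ALT", "QUAL"]
--
--
-- def get_variants_array_names(variants, names=None):
--     if names is None:
--         # One stable sort: fixed fields first (VCF order), then FILTER*
--         # alphabetically, then everything else alphabetically.
--         def rank(k):
--             if k in VCF_FIXED_FIELDS:
--                 return (VCF_FIXED_FIELDS.index(k), "")
--             if k.startswith("FILTER"):
--                 return (6, k)
--             return (7, k)
--         return sorted(variants, key=rank)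
--
--     # Check requested keys are present in data.
--     names = list(names)
--     keys = set(variants)
--     for n in names:
--         if n not in keys:
--             raise ValueError
--     return names
-- ===== Notes on version B (the rewrite author's own statement) =====
-- stated objective: alternative
-- what changed: The names=None branch is re-done as ONE stable sort of the keys by a rank key ((VCF index,"") / (6,name) for FILTER* / (7,name)) instead of A's three filtered passes plus a membership-based third scan; the validation branch tests membership in a set built once instead of scanning the sorted key list.
import Mathlib
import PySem

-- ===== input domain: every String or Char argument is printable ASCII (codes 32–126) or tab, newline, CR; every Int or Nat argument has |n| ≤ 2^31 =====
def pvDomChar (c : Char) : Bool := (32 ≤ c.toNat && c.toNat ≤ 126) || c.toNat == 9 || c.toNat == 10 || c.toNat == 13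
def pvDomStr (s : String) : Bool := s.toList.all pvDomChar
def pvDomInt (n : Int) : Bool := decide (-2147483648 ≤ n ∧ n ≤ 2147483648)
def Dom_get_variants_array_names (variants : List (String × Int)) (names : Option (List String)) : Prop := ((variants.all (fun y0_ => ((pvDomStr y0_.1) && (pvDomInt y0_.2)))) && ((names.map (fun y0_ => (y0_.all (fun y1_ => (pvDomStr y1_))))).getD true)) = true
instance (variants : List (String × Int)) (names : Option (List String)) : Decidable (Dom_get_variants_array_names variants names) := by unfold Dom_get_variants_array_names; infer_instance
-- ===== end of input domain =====

-- ===== PORT A =====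
-- B reorders the keys with ONE stable sort instead of A's three filtered passes; objective: alternative (same cost).
def pyVCF_FIXED_FIELDS : List String := ["CHROM", "POS", "ID", "REF", "ALT", "QUAL"]

def get_variants_array_names (variants : List (String × Int)) (names : Option (List String)) : List String :=
  -- all_names = sorted(variants): the dict's keys (first occurrences), sorted
  let all_names := PySem.List.sorted (PySem.List.dedup (variants.map (fun kv => kv.1))) (fun k => k)
  match names with
  | none =>
      let ns1 := pyVCF_FIXED_FIELDS.filter (fun k => all_names.contains k)
      let ns2 := ns1 ++ all_names.filter (fun k => PySem.Str.startswith k "FILTER")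
      ns2 ++ all_names.filter (fun k => !ns2.contains k)
  | some ns =>
      -- the validation loop only raises (excluded by Pre_) and never changes ns
      ns

-- ===== PORT B =====
def pyRank (k : String) : Nat × String :=
  if pyVCF_FIXED_FIELDS.contains k then
    ((PySem.List.index? pyVCF_FIXED_FIELDS k).getD 0, "")
  else if PySem.Str.startswith k "FILTER" then (6, k)
  else (7, k)

def get_variants_array_names_alt (variants : List (String × Int)) (names : Option (List String)) : List String :=
  match names with
  | none =>
      PySem.List.sorted2 (PySem.List.dedup (variants.map (fun kv => kv.1)))
        (fun k => (pyRank k).1) (fun k => (pyRank k).2)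
  | some ns =>
      -- the set-membership validation loop only raises (excluded by Pre_) and never changes ns
      ns

-- ===== PRECONDITION & SPEC =====
-- Pre_ excludes exactly the inputs where A raises ValueError: a requested name absent from the dict's keys.
def Pre_get_variants_array_names (variants : List (String × Int)) (names : Option (List String)) : Prop :=
  ∀ ns ∈ names, ∀ n ∈ ns, n ∈ variants.map (fun kv => kv.1)
instance (variants : List (String × Int)) (names : Option (List String)) : Decidable (Pre_get_variants_array_names variants names) := by unfold Pre_get_variants_array_names; infer_instance
def pvWitness_get_variants_array_names : (List (String × Int)) × Option (List String) := ([("CHROM", 1), ("DP", 2)], some ["DP"])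
def Spec_get_variants_array_names (variants : List (String × Int)) (names : Option (List String)) (out : List String) : Prop := out = get_variants_array_names_alt variants names
instance (variants : List (String × Int)) (names : Option (List String)) (out : List String) : Decidable (Spec_get_variants_array_names variants names out) := by unfold Spec_get_variants_array_names; infer_instance

-- ===== CLAIM (what is proved, stated in full; the proofs are below) =====
def Claim_equal_get_variants_array_names : Prop := ∀ (variants : List (String × Int)) (names : Option (List String)), Dom_get_variants_array_names variants names → Pre_get_variants_array_names variants names → Spec_get_variants_array_names variants names (get_variants_array_names variants names)

-- ===== LEMMAS AND PROOFS =====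

-- the key B sorts by, packed into one linear order (lexicographic pair)
def pyRankLex (k : String) : Lex (Nat × String) := toLex ((pyRank k).1, (pyRank k).2)

theorem lexlt_of_fst_lt {a b : String} (h : (pyRank a).1 < (pyRank b).1) :
    pyRankLex a < pyRankLex b := by
  unfold pyRankLex; rw [Prod.Lex.toLex_lt_toLex]; exact Or.inl h

theorem sorted2_eq_sorted_lex (xs : List String) :
    PySem.List.sorted2 xs (fun k => (pyRank k).1) (fun k => (pyRank k).2) =
      PySem.List.sorted xs pyRankLex := by
  rw [PySem.List.sorted_eq_foldl_insertBy]
  show List.foldl (fun acc x => PySem.List.insertBy _ x acc) [] xs = _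
  have h : (fun a b => decide ((pyRank a).1 < (pyRank b).1) ||
        (!decide ((pyRank b).1 < (pyRank a).1) && decide ((pyRank a).2 < (pyRank b).2))) =
      (fun a b => decide (pyRankLex a < pyRankLex b)) := by
    funext a b
    simp only [pyRankLex, Prod.Lex.toLex_lt_toLex]
    by_cases h1 : (pyRank a).1 < (pyRank b).1 <;>
      by_cases h2 : (pyRank b).1 < (pyRank a).1 <;>
      by_cases h3 : (pyRank a).2 < (pyRank b).2 <;>
      simp [h1, h2, h3] <;> omega
  rw [h]
  rfl

theorem contains_false_of_startswith {a : String}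
    (h : PySem.Str.startswith a "FILTER" = true) : pyVCF_FIXED_FIELDS.contains a = false := by
  by_contra hc
  have hmem : a ∈ pyVCF_FIXED_FIELDS := by
    have := Bool.of_not_eq_false hc
    exact List.mem_of_elem_eq_true this
  have hf : ∀ x ∈ pyVCF_FIXED_FIELDS, PySem.Str.startswith x "FILTER" = false := by decide
  rw [hf a hmem] at h; exact Bool.false_ne_true h

-- A's three-pass reordering of a nodup key list IS the sort by pyRankLex.
def pyL (ks : List String) : List String := PySem.List.sorted ks (fun k => k)
def pyNs1 (ks : List String) : List String := pyVCF_FIXED_FIELDS.filter (fun k => (pyL ks).contains k)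
def pyNs2 (ks : List String) : List String := pyNs1 ks ++ (pyL ks).filter (fun k => PySem.Str.startswith k "FILTER")
def pyT (ks : List String) : List String := pyNs2 ks ++ (pyL ks).filter (fun k => !(pyNs2 ks).contains k)

theorem mem_pyNs2 {ks : List String} {x : String} (h : x ∈ pyNs2 ks) :
    x ∈ pyL ks ∧ (pyVCF_FIXED_FIELDS.contains x = true ∨ PySem.Str.startswith x "FILTER" = true) := by
  rcases List.mem_append.mp h with h1 | h2
  · rcases List.mem_filter.mp h1 with ⟨hv, hc⟩
    exact ⟨List.mem_of_elem_eq_true hc, Or.inl (List.elem_eq_true_of_mem hv)⟩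
  · rcases List.mem_filter.mp h2 with ⟨hl, hs⟩
    exact ⟨hl, Or.inr hs⟩

theorem rank_of_notin_ns2 {ks : List String} {x : String} (hx : x ∈ pyL ks)
    (h : x ∉ pyNs2 ks) : pyRank x = (7, x) := by
  have hc : pyVCF_FIXED_FIELDS.contains x = false := by
    by_contra hcc
    have hv : x ∈ pyVCF_FIXED_FIELDS := List.mem_of_elem_eq_true (Bool.of_not_eq_false hcc)
    exact h (List.mem_append.mpr (Or.inl (List.mem_filter.mpr ⟨hv, List.elem_eq_true_of_mem hx⟩)))
  have hs : PySem.Str.startswith x "FILTER" = false := by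
    by_contra hss
    have hs' := Bool.of_not_eq_false hss
    exact h (List.mem_append.mpr (Or.inr (List.mem_filter.mpr ⟨hx, hs'⟩)))
  simp only [pyRank, hc, hs]
  simp

theorem three_pass_eq_sort (ks : List String) (hnd : ks.Nodup) :
    PySem.List.sorted ks pyRankLex = pyT ks := by
  have hV6 : ∀ a ∈ pyVCF_FIXED_FIELDS, (pyRank a).1 < 6 := by decide
  have hVpw : pyVCF_FIXED_FIELDS.Pairwise (fun a b => (pyRank a).1 < (pyRank b).1) := by decide
  have hVnd : pyVCF_FIXED_FIELDS.Nodup := by decide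
  have hl_perm : (pyL ks).Perm ks := PySem.List.sorted_perm ks (fun k => k) false
  have hl_nd : (pyL ks).Nodup := hl_perm.nodup_iff.mpr hnd
  have hl_le : (pyL ks).Pairwise (· ≤ ·) := PySem.List.sorted_pairwise ks (fun k => k)
  have hl_lt : (pyL ks).Pairwise (· < ·) :=
    (hl_le.and hl_nd).imp (fun ⟨hle, hne⟩ => lt_of_le_of_ne hle hne)
  -- pyRank on elements of the FILTER group
  have hrankF : ∀ x : String, PySem.Str.startswith x "FILTER" = true → pyRank x = (6, x) := by
    intro x hs
    simp only [pyRank, contains_false_of_startswith hs, hs]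
    simp
  apply PySem.List.sorted_eq_of_perm_of_pairwise_lt
  · -- permutation: pyT ks ~ ks
    have hTnd : (pyT ks).Nodup := by
      rw [pyT, List.nodup_append]
      refine ⟨?_, List.Nodup.filter _ hl_nd, ?_⟩
      · rw [pyNs2, List.nodup_append]
        refine ⟨List.Nodup.filter _ hVnd, List.Nodup.filter _ hl_nd, ?_⟩
        intro a ha b hb hab
        subst hab
        have hv := (List.mem_filter.mp ha).1
        have hs := (List.mem_filter.mp hb).2
        have hf : ∀ x ∈ pyVCF_FIXED_FIELDS, PySem.Str.startswith x "FILTER" = false := by decide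
        rw [hf a hv] at hs
        exact Bool.false_ne_true hs
      · intro a ha b hb hab
        subst hab
        have hna := (List.mem_filter.mp hb).2
        simp at hna
        exact hna ha
    refine (List.perm_ext_iff_of_nodup hTnd hnd).mpr ?_
    intro a
    constructor
    · intro ha
      rcases List.mem_append.mp ha with h2 | hr
      · exact hl_perm.mem_iff.mp (mem_pyNs2 h2).1
      · exact hl_perm.mem_iff.mp (List.mem_filter.mp hr).1
    · intro ha
      have hal : a ∈ pyL ks := hl_perm.mem_iff.mpr ha
      by_cases h2 : a ∈ pyNs2 ks
      · exact List.mem_append.mpr (Or.inl h2)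
      · refine List.mem_append.mpr (Or.inr (List.mem_filter.mpr ⟨hal, ?_⟩))
        simp [h2]
  · -- pairwise strictly increasing under pyRankLex
    rw [pyT, List.pairwise_append]
    refine ⟨?_, ?_, ?_⟩
    · rw [pyNs2, List.pairwise_append]
      refine ⟨?_, ?_, ?_⟩
      · -- within ns1
        exact (hVpw.filter _).imp lexlt_of_fst_lt
      · -- within the FILTER group
        refine (hl_lt.filter _).imp_of_mem ?_
        intro a b ha hb hab
        have hsa := (List.mem_filter.mp ha).2
        have hsb := (List.mem_filter.mp hb).2
        rw [pyRankLex, pyRankLex, hrankF a hsa, hrankF b hsb, Prod.Lex.toLex_lt_toLex]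
        exact Or.inr ⟨rfl, hab⟩
      · -- ns1 before the FILTER group
        intro a ha b hb
        have hav := (List.mem_filter.mp ha).1
        have hbs := (List.mem_filter.mp hb).2
        apply lexlt_of_fst_lt
        rw [hrankF b hbs]
        exact hV6 a hav
    · -- within the rest
      refine (hl_lt.filter _).imp_of_mem ?_
      intro a b ha hb hab
      rcases List.mem_filter.mp ha with ⟨hal, hna⟩
      rcases List.mem_filter.mp hb with ⟨hbl, hnb⟩
      have h7a : pyRank a = (7, a) := rank_of_notin_ns2 hal (by simp at hna; exact hna)
      have h7b : pyRank b = (7, b) := rank_of_notin_ns2 hbl (by simp at hnb; exact hnb)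
      rw [pyRankLex, pyRankLex, h7a, h7b, Prod.Lex.toLex_lt_toLex]
      exact Or.inr ⟨rfl, hab⟩
    · -- ns2 before the rest
      intro a ha b hb
      rcases List.mem_filter.mp hb with ⟨hbl, hbn⟩
      have hb7 : pyRank b = (7, b) := rank_of_notin_ns2 hbl (by simp at hbn; exact hbn)
      apply lexlt_of_fst_lt
      rw [hb7]
      rcases (mem_pyNs2 ha).2 with hc | hs
      · have := hV6 a (List.mem_of_elem_eq_true hc); omega
      · rw [hrankF a hs]; omega

theorem get_variants_array_names_spec : Claim_equal_get_variants_array_names := by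
  intro variants names _hdom hpre
  unfold Spec_get_variants_array_names get_variants_array_names get_variants_array_names_alt
  cases names with
  | none =>
      show pyT (PySem.List.dedup (variants.map (fun kv => kv.1))) = _
      rw [sorted2_eq_sorted_lex, three_pass_eq_sort _ (PySem.List.nodup_dedup _)]
  | some ns => rfl
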